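-- pv_equiv track=rewrite | github.com/siliconbaselife/hunter_robot | service/chat_plugin_service.py | has_reply
-- ===== SOURCE A (Python) =====
-- def has_reply(details):
--     if len(details) == 0:
--         return False
--
--     if details[-1]["speaker"] == "robot":
--         return False
--
--     flag = False
--     num = 0
--     for i in range(len(details)):
--         index = len(details) - 1 - i
--         msg_info = details[index]
--         if msg_info["speaker"] == "robot":
--             now_flag = False
--         else:
--             now_flag = True
--
--         if not flag and now_flag:
--             num += 1
--         flag = now_flag
--
--     return num == 1
-- ===== SOURCE B (Python) =====
-- def has_reply(details):
--     idx = [i for i, d in enumerate(details) if d["speaker"] != "robot"]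
--     if not idx:
--         return False
--     return idx[-1] == len(details) - 1 and idx[-1] - idx[0] + 1 == len(idx)
-- ===== Notes on version B (the rewrite author's own statement) =====
-- stated objective: simpler
-- what changed: Replaced the reversed flag-tracking run-counter loop with an index table: collect the indices of non-robot messages once and decide by an arithmetic contiguity check (last index is the final message and last-first+1 equals the count).
-- outside the precondition, e.g. on has_reply([{}, {'speaker': 'robot'}]): A returns False, B raises KeyError
import Mathlib
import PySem

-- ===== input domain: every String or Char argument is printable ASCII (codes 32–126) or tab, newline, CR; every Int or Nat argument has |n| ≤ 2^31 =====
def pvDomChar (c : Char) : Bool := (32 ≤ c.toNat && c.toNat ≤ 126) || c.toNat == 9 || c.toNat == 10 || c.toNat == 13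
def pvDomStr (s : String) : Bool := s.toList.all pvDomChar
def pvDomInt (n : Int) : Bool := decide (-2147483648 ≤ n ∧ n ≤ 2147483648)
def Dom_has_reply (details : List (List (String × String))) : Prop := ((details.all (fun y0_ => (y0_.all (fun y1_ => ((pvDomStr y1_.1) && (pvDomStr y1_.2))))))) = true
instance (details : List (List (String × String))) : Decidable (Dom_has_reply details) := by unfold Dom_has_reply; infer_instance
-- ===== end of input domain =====

-- B replaces A's reversed flag-tracking run-counter with an index table of non-robot
-- messages plus an arithmetic contiguity/endpoint check (objective: simpler).

-- shared accessor: d["speaker"] (first match in the association list; the .getD ""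
-- default is never reached on inputs satisfying Pre_has_reply)
def pvSpk (d : List (String × String)) : String := (d.lookup "speaker").getD ""

-- ===== PORT A =====
def has_reply (details : List (List (String × String))) : Bool :=
  if details.length == 0 then false
  else if pvSpk ((PySem.List.pyGet? details (-1)).getD []) == "robot" then false
  else
    let r := (PySem.List.pyRange 0 (details.length : Int) 1).foldl
      (fun (s : Bool × Int) i =>
        let index : Int := (details.length : Int) - 1 - i
        let msg := PySem.List.pyGetD details index []
        let nowFlag : Bool := !(pvSpk msg == "robot")
        (nowFlag, if !s.1 && nowFlag then s.2 + 1 else s.2)) (false, (0 : Int))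
    r.2 == 1

-- ===== PORT B =====
def has_reply_alt (details : List (List (String × String))) : Bool :=
  let idx : List Int := (PySem.List.enumerate details).filterMap
    (fun p => if !(pvSpk p.2 == "robot") then some p.1 else none)
  if idx.isEmpty then false
  else ((PySem.List.pyGetD idx (-1) 0 == (details.length : Int) - 1)
     && (PySem.List.pyGetD idx (-1) 0 - PySem.List.pyGetD idx 0 0 + 1 == (idx.length : Int)))

-- ===== PRECONDITION & SPEC =====
-- Pre_ excludes inputs where some message dict has no "speaker" key: Python A raises
-- KeyError on all of them except when the final message's speaker is "robot" (where A
-- returns False early); on every such input B itself raises KeyError, so they are excluded.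
def Pre_has_reply (details : List (List (String × String))) : Prop :=
  ∀ d ∈ details, ((d.lookup "speaker").isSome = true)
instance (details : List (List (String × String))) : Decidable (Pre_has_reply details) := by
  unfold Pre_has_reply; infer_instance
def pvWitness_has_reply : (List (List (String × String))) := [[("speaker", "user")]]
def Spec_has_reply (details : List (List (String × String))) (out : Bool) : Prop := out = has_reply_alt details
instance (details : List (List (String × String))) (out : Bool) : Decidable (Spec_has_reply details out) := by unfold Spec_has_reply; infer_instance

-- ===== CLAIM (what is proved, stated in full; the proofs are below) =====
def Claim_equal_has_reply : Prop := ∀ (details : List (List (String × String))), Dom_has_reply details → Pre_has_reply details → Spec_has_reply details (has_reply details)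

-- ===== LEMMAS AND PROOFS =====

-- boolean trace of the conversation: true = non-robot message
def flagsOf (details : List (List (String × String))) : List Bool :=
  details.map (fun d => !(pvSpk d == "robot"))

-- number of rises (false→true edges) when scanning l with previous value prev
def countRises : List Bool → Bool → Int
  | [], _ => 0
  | b :: t, prev => (if !prev && b then 1 else 0) + countRises t b

-- positions (from start s) of the true flags
def posFrom : Int → List Bool → List Int
  | _, [] => []
  | s, b :: t => if b then s :: posFrom (s + 1) t else posFrom (s + 1) t

-- abstract forms of the two ports over the flag list
def aForm (bs : List Bool) : Bool :=
  if bs.isEmpty then false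
  else if bs.getLastD false then countRises bs.reverse false == 1 else false

def bForm (bs : List Bool) : Bool :=
  let idx := posFrom 0 bs
  if idx.isEmpty then false
  else ((PySem.List.pyGetD idx (-1) 0 == (bs.length : Int) - 1)
     && (PySem.List.pyGetD idx (-1) 0 - PySem.List.pyGetD idx 0 0 + 1 == (idx.length : Int)))

-- the canonical shape both ports detect: some robot prefix, then a non-empty non-robot block to the end
def Shape (bs : List Bool) : Prop :=
  ∃ m k : Nat, 0 < k ∧ bs = List.replicate m false ++ List.replicate k true

theorem countRises_nonneg (l : List Bool) (prev : Bool) : 0 ≤ countRises l prev := by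
  induction l generalizing prev with
  | nil => simp [countRises]
  | cons b t ih =>
    have := ih b
    simp only [countRises]
    split <;> omega

theorem countRises_allFalse (l : List Bool) (prev : Bool) (h : ∀ b ∈ l, b = false) :
    countRises l prev = 0 := by
  induction l generalizing prev with
  | nil => simp [countRises]
  | cons b t ih =>
    have hb : b = false := h b (by simp)
    subst hb
    simp only [countRises]
    rw [ih false (fun x hx => h x (by simp [hx]))]
    simp

theorem countRises_false_eq_zero (l : List Bool) (h : countRises l false = 0) :
    ∀ b ∈ l, b = false := by
  induction l with
  | nil => simp
  | cons b t ih =>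
    cases b with
    | true =>
      exfalso
      have := countRises_nonneg t true
      simp [countRises] at h
      omega
    | false =>
      simp only [countRises] at h
      simp at h
      intro x hx
      rcases List.mem_cons.1 hx with h1 | h1
      · exact h1
      · exact ih h x h1

theorem countRises_true_eq_zero_iff (l : List Bool) :
    countRises l true = 0 ↔ ∃ a m : Nat, l = List.replicate a true ++ List.replicate m false := by
  constructor
  · intro h
    induction l with
    | nil => exact ⟨0, 0, rfl⟩
    | cons b t ih =>
      cases b with
      | true =>
        simp only [countRises] at h
        simp at h
        obtain ⟨a, m, ht⟩ := ih h
        exact ⟨a + 1, m, by simp [List.replicate_succ, ht]⟩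
      | false =>
        simp only [countRises] at h
        simp at h
        have hall := countRises_false_eq_zero t h
        refine ⟨0, t.length + 1, ?_⟩
        simp [List.replicate_succ]
        exact List.eq_replicate_of_mem hall
  · rintro ⟨a, m, rfl⟩
    induction a with
    | zero =>
      simp
      exact countRises_allFalse _ _ (by simp)
    | succ a iha =>
      simp only [List.replicate_succ, List.cons_append, countRises]
      simp
      exact iha

theorem shape_getLast (m k : Nat) (hk : 0 < k) :
    (List.replicate m false ++ List.replicate k true : List Bool).getLastD false = true := by
  obtain ⟨k', rfl⟩ : ∃ k', k = k' + 1 := ⟨k - 1, by omega⟩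
  rw [List.replicate_succ' (n := k'), ← List.append_assoc, List.getLastD_concat]

theorem aForm_iff (bs : List Bool) : aForm bs = true ↔ Shape bs := by
  rcases hr : bs.reverse with _ | ⟨c, t⟩
  · have hb : bs = [] := by rw [← bs.reverse_reverse, hr]; rfl
    subst hb
    constructor
    · intro h; simp [aForm] at h
    · rintro ⟨m, k, hk, habs⟩
      have := congrArg List.length habs
      simp at this
      omega
  · have hb : bs = t.reverse ++ [c] := by rw [← bs.reverse_reverse, hr]; simp
    subst hb
    have hrev : (t.reverse ++ [c]).reverse = c :: t := by simp
    cases c with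
    | false =>
      constructor
      · intro h
        simp [aForm] at h
      · rintro ⟨m, k, hk, habs⟩
        have := shape_getLast m k hk
        rw [← habs, List.getLastD_concat] at this
        exact absurd this (by simp)
    | true =>
      have h1 : aForm (t.reverse ++ [true]) = (countRises (true :: t) false == 1) := by
        simp [aForm, hrev]
      rw [h1]
      have h2 : countRises (true :: t) false = 1 + countRises t true := by
        simp [countRises]
      constructor
      · intro h
        rw [beq_iff_eq, h2] at h
        have h0 : countRises t true = 0 := by omega
        obtain ⟨a, m, rfl⟩ := (countRises_true_eq_zero_iff t).1 h0
        refine ⟨m, a + 1, by omega, ?_⟩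
        rw [List.replicate_succ' (n := a)]
        simp [List.reverse_append]
      · rintro ⟨m, k, hk, habs⟩
        obtain ⟨k', rfl⟩ : ∃ k', k = k' + 1 := ⟨k - 1, by omega⟩
        rw [List.replicate_succ' (n := k'), ← List.append_assoc] at habs
        have ht : t.reverse = List.replicate m false ++ List.replicate k' true :=
          by have := List.append_inj_left' habs rfl; exact this
        have htt : t = List.replicate k' true ++ List.replicate m false := by
          have := congrArg List.reverse ht
          simpa using this
        rw [beq_iff_eq, h2, htt]
        have : countRises (List.replicate k' true ++ List.replicate m false) true = 0 :=
          (countRises_true_eq_zero_iff _).2 ⟨k', m, rfl⟩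
        omega

theorem posFrom_mem (bs : List Bool) (s x : Int) :
    x ∈ posFrom s bs ↔ ∃ k : Nat, ∃ h : k < bs.length, bs[k] = true ∧ x = s + k := by
  induction bs generalizing s with
  | nil => simp [posFrom]
  | cons b t ih =>
    cases b with
    | true =>
      rw [show posFrom s (true :: t) = s :: posFrom (s + 1) t from rfl]
      simp only [List.mem_cons, ih (s + 1)]
      constructor
      · rintro (rfl | ⟨k, hk, hb, rfl⟩)
        · exact ⟨0, by simp, by simp, by simp⟩
        · exact ⟨k + 1, by simpa using hk, by simpa using hb, by push_cast; ring⟩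
      · rintro ⟨k, hk, hb, rfl⟩
        cases k with
        | zero => left; simp
        | succ j =>
          right
          exact ⟨j, by simpa using hk, by simpa using hb, by push_cast; ring⟩
    | false =>
      rw [show posFrom s (false :: t) = posFrom (s + 1) t from rfl]
      rw [ih (s + 1)]
      constructor
      · rintro ⟨k, hk, hb, rfl⟩
        exact ⟨k + 1, by simpa using hk, by simpa using hb, by push_cast; ring⟩
      · rintro ⟨k, hk, hb, rfl⟩
        cases k with
        | zero => simp at hb
        | succ j =>
          exact ⟨j, by simpa using hk, by simpa using hb, by push_cast; ring⟩

theorem posFrom_lb (bs : List Bool) (s x : Int) (hx : x ∈ posFrom s bs) : s ≤ x := by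
  obtain ⟨k, hk, hb, rfl⟩ := (posFrom_mem bs s x).1 hx
  omega

theorem posFrom_pairwise (bs : List Bool) (s : Int) : (posFrom s bs).Pairwise (· < ·) := by
  induction bs generalizing s with
  | nil => simp [posFrom]
  | cons b t ih =>
    cases b with
    | true =>
      rw [show posFrom s (true :: t) = s :: posFrom (s + 1) t from rfl, List.pairwise_cons]
      exact ⟨fun y hy => by have := posFrom_lb t (s + 1) y hy; omega, ih (s + 1)⟩
    | false =>
      rw [show posFrom s (false :: t) = posFrom (s + 1) t from rfl]
      exact ih (s + 1)

theorem posFrom_append_false (s : Int) (m : Nat) (t : List Bool) :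
    posFrom s (List.replicate m false ++ t) = posFrom (s + m) t := by
  induction m generalizing s with
  | zero => simp
  | succ m ih =>
    rw [List.replicate_succ, List.cons_append,
      show posFrom s (false :: (List.replicate m false ++ t)) = posFrom (s + 1) (List.replicate m false ++ t) from rfl]
    rw [ih (s + 1)]
    congr 1
    push_cast
    ring

theorem posFrom_replicate_true (s : Int) (k : Nat) :
    posFrom s (List.replicate k true) = PySem.List.pyRange s (s + k) 1 := by
  induction k generalizing s with
  | zero => simp [posFrom, PySem.List.pyRange_one_eq_nil]
  | succ k ih =>
    rw [List.replicate_succ,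
      show posFrom s (true :: List.replicate k true) = s :: posFrom (s + 1) (List.replicate k true) from rfl]
    rw [ih (s + 1)]
    conv_rhs => rw [PySem.List.pyRange_one_cons (by push_cast; omega)]
    congr 2
    push_cast
    ring

-- a strictly increasing Int list has length ≤ last - head + 1
theorem inc_length_le : ∀ (l : List Int), l.Pairwise (· < ·) → ∀ hne : l ≠ [],
    (l.length : Int) ≤ l.getLast hne - l.head hne + 1
  | [], _, hne => absurd rfl hne
  | [a], _, _ => by simp
  | a :: b :: t, hp, _ => by
    have hab : a < b := (List.pairwise_cons.1 hp).1 b (by simp)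
    have ih := inc_length_le (b :: t) (List.pairwise_cons.1 hp).2 (by simp)
    rw [List.getLast_cons (by simp), List.head_cons]
    rw [List.head_cons] at ih
    simp only [List.length_cons] at ih ⊢
    push_cast at ih ⊢
    omega

-- ... and when length = last - head + 1 it contains every value in between
theorem inc_full : ∀ (l : List Int), l.Pairwise (· < ·) → ∀ hne : l ≠ [],
    l.getLast hne - l.head hne + 1 = l.length →
    ∀ x : Int, l.head hne ≤ x → x ≤ l.getLast hne → x ∈ l
  | [], _, hne, _, _, _, _ => absurd rfl hne
  | [a], _, _, _, x, h1, h2 => by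
    simp only [List.head_cons] at h1
    simp only [List.getLast_singleton] at h2
    have : x = a := le_antisymm h2 h1
    simp [this]
  | a :: b :: t, hp, _, hlen, x, h1, h2 => by
    have hab : a < b := (List.pairwise_cons.1 hp).1 b (by simp)
    have hp' := (List.pairwise_cons.1 hp).2
    have hle := inc_length_le (b :: t) hp' (by simp)
    rw [List.getLast_cons (by simp)] at hlen h2
    rw [List.head_cons] at hlen
    rw [List.head_cons] at h1
    rw [List.head_cons] at hle
    simp only [List.length_cons] at hlen hle
    push_cast at hlen hle
    have hb : b = a + 1 := by omega
    have hlen' : (b :: t).getLast (by simp) - (b :: t).head (by simp) + 1 = (b :: t).length := by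
      rw [List.head_cons]
      simp only [List.length_cons]
      push_cast
      omega
    rcases eq_or_lt_of_le h1 with rfl | hx
    · exact List.mem_cons_self
    · have : x ∈ b :: t := inc_full (b :: t) hp' (by simp) hlen' x (by rw [List.head_cons]; omega) h2
      exact List.mem_cons_of_mem a this

theorem pairwise_head_le (l : List Int) (hp : l.Pairwise (· < ·)) (hne : l ≠ []) :
    ∀ x ∈ l, l.head hne ≤ x := by
  cases l with
  | nil => exact absurd rfl hne
  | cons y ys =>
    intro x hx
    rw [List.head_cons]
    rcases List.mem_cons.1 hx with rfl | hx'
    · exact le_refl x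
    · exact le_of_lt ((List.pairwise_cons.1 hp).1 x hx')

theorem bForm_iff (bs : List Bool) : bForm bs = true ↔ Shape bs := by
  constructor
  · intro h
    simp only [bForm] at h
    by_cases hE : (posFrom 0 bs).isEmpty
    · rw [if_pos hE] at h
      exact absurd h (by simp)
    · rw [if_neg hE] at h
      obtain ⟨y, ys, hidx⟩ : ∃ y ys, posFrom 0 bs = y :: ys := by
        cases hI : posFrom 0 bs with
        | nil => rw [hI] at hE; simp at hE
        | cons y ys => exact ⟨y, ys, rfl⟩
      rw [hidx] at h
      rw [PySem.List.pyGetD_neg_one (y :: ys) 0 (by simp),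
        PySem.List.pyGetD_zero_cons y ys 0] at h
      rw [Bool.and_eq_true, beq_iff_eq, beq_iff_eq] at h
      obtain ⟨hL, hlen⟩ := h
      have hp : (y :: ys).Pairwise (· < ·) := hidx ▸ posFrom_pairwise bs 0
      have hmem : ∀ x : Int, x ∈ y :: ys ↔
          ∃ k : Nat, ∃ hk : k < bs.length, bs[k] = true ∧ x = 0 + k := by
        intro x; rw [← hidx]; exact posFrom_mem bs 0 x
      have hy0 : 0 ≤ y := posFrom_lb bs 0 y (by rw [hidx]; simp)
      have hheadle := pairwise_head_le (y :: ys) hp (by simp)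
      simp only [List.head_cons] at hheadle
      have hlastmem := List.getLast_mem (l := y :: ys) (by simp)
      have hyL : y ≤ (bs.length : Int) - 1 := by
        have h1 := hheadle _ hlastmem
        rw [hL] at h1
        exact h1
      obtain ⟨kL, hkL, hbL, hxL⟩ := (hmem _).1 hlastmem
      rw [hL] at hxL
      have hn1 : 0 < bs.length := by omega
      set m : Nat := y.toNat with hm
      have hym : (m : Int) = y := Int.toNat_of_nonneg hy0
      have hmn : m ≤ bs.length - 1 := by omega
      have hlen' : (y :: ys).getLast (by simp) - (y :: ys).head (by simp) + 1 =
          ((y :: ys).length : Int) := by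
        rw [List.head_cons]
        exact hlen
      have hfull := inc_full (y :: ys) hp (by simp) hlen'
      have htrue : ∀ j : Nat, ∀ hj : j < bs.length, m ≤ j → bs[j] = true := by
        intro j hj hmj
        have hx : (j : Int) ∈ y :: ys := by
          apply hfull
          · rw [List.head_cons]; omega
          · rw [hL]; omega
        obtain ⟨k', hk', hb', hxk⟩ := (hmem _).1 hx
        have hkj : k' = j := by omega
        subst hkj
        exact hb'
      have hfalse : ∀ j : Nat, ∀ hj : j < bs.length, j < m → bs[j] = false := by
        intro j hj hjm
        by_contra hcon
        have hbj : bs[j] = true := by revert hcon; cases bs[j] <;> simp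
        have hx : (j : Int) ∈ y :: ys := (hmem _).2 ⟨j, hj, hbj, by omega⟩
        have := hheadle _ hx
        omega
      refine ⟨m, bs.length - m, by omega, ?_⟩
      apply List.ext_getElem (by simp; omega)
      intro i h1 h2
      by_cases him : i < m
      · rw [List.getElem_append_left (by simpa using him), List.getElem_replicate]
        exact hfalse i h1 him
      · rw [List.getElem_append_right (by simpa using him), List.getElem_replicate]
        exact htrue i h1 (by omega)
  · rintro ⟨m, k, hk, rfl⟩
    have hidx : posFrom 0 (List.replicate m false ++ List.replicate k true) =
        PySem.List.pyRange ((0 : Int) + m) (0 + m + k) 1 := by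
      rw [posFrom_append_false, posFrom_replicate_true]
    have hcons : PySem.List.pyRange ((0 : Int) + m) (0 + m + k) 1 =
        ((0 : Int) + m) :: PySem.List.pyRange (0 + m + 1) (0 + m + k) 1 :=
      PySem.List.pyRange_one_cons (by omega)
    have hsnoc : PySem.List.pyRange ((0 : Int) + m) (0 + m + k) 1 =
        PySem.List.pyRange ((0 : Int) + m) (0 + m + k - 1) 1 ++ [(0 : Int) + m + k - 1] := by
      conv_lhs => rw [show (0 : Int) + m + k = (0 + m + k - 1) + 1 by ring]
      rw [PySem.List.pyRange_one_succ_right (by omega)]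
    simp only [bForm, hidx]
    rw [if_neg (by rw [hcons]; simp)]
    rw [show PySem.List.pyGetD (PySem.List.pyRange ((0 : Int) + m) (0 + m + k) 1) (-1) 0 =
        (0 : Int) + m + k - 1 by rw [hsnoc]; exact PySem.List.pyGetD_neg_one_append_singleton _ _ _]
    rw [show PySem.List.pyGetD (PySem.List.pyRange ((0 : Int) + m) (0 + m + k) 1) 0 0 =
        (0 : Int) + m by rw [hcons]; exact PySem.List.pyGetD_zero_cons _ _ _]
    rw [PySem.List.length_pyRange_one]
    simp only [Bool.and_eq_true, beq_iff_eq]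
    refine ⟨?_, ?_⟩
    · simp only [List.length_append, List.length_replicate]
      push_cast
      omega
    · rw [Int.toNat_of_nonneg (by omega)]
      omega

theorem crux (bs : List Bool) : aForm bs = bForm bs := by
  have ha := aForm_iff bs
  have hb := bForm_iff bs
  cases h1 : aForm bs <;> cases h2 : bForm bs <;> simp_all

def stepFn (s : Bool × Int) (msg : List (String × String)) : Bool × Int :=
  (!(pvSpk msg == "robot"), if !s.1 && !(pvSpk msg == "robot") then s.2 + 1 else s.2)

theorem foldl_range_rev (xs : List (List (String × String))) (init : Bool × Int) :
    (PySem.List.pyRange 0 (xs.length : Int) 1).foldl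
      (fun (s : Bool × Int) i =>
        stepFn s (PySem.List.pyGetD xs ((xs.length : Int) - 1 - i) [])) init
      = xs.reverse.foldl stepFn init := by
  have hmap : (PySem.List.pyRange 0 (xs.length : Int) 1).map
      (fun i => PySem.List.pyGetD xs ((xs.length : Int) - 1 - i) ([] : List (String × String)))
      = xs.reverse := by
    apply List.ext_getElem
    · simp [PySem.List.length_pyRange_one]
    · intro i h1 h2
      rw [List.getElem_map, PySem.List.getElem_pyRange_one]
      rw [List.length_map, PySem.List.length_pyRange_one] at h1
      rw [PySem.List.pyGetD_eq_getElem _ _ (by omega) (by omega)]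
      rw [List.getElem_reverse]
      congr 1
      omega
  rw [← hmap, List.foldl_map]

theorem foldl_step_eq (l : List (List (String × String))) (prev : Bool) (n : Int) :
    (l.foldl stepFn (prev, n)).2 =
      n + countRises (l.map (fun d => !(pvSpk d == "robot"))) prev := by
  induction l generalizing prev n with
  | nil => simp [countRises]
  | cons d t ih =>
    rw [List.foldl_cons, List.map_cons]
    rw [show stepFn (prev, n) d =
        (!(pvSpk d == "robot"), if !prev && !(pvSpk d == "robot") then n + 1 else n) from rfl]
    rw [ih]
    rw [show countRises ((!(pvSpk d == "robot")) :: t.map (fun d => !(pvSpk d == "robot"))) prev =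
        (if !prev && !(pvSpk d == "robot") then 1 else 0) +
          countRises (t.map (fun d => !(pvSpk d == "robot"))) (!(pvSpk d == "robot")) from rfl]
    split_ifs <;> omega

theorem A_eq (details : List (List (String × String))) :
    has_reply details = aForm (flagsOf details) := by
  cases details with
  | nil => simp [has_reply, aForm, flagsOf]
  | cons d t =>
    have hne : (d :: t) ≠ [] := by simp
    have hglast : (PySem.List.pyGet? (d :: t) (-1)).getD [] = (d :: t).getLast hne := by
      rw [PySem.List.pyGet?_neg_one, List.getLast?_eq_some_getLast hne, Option.getD_some]
    have hlastD : (flagsOf (d :: t)).getLastD false =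
        !(pvSpk ((d :: t).getLast hne) == "robot") := by
      rw [List.getLastD_eq_getLast?]
      unfold flagsOf
      rw [List.getLast?_map, List.getLast?_eq_some_getLast hne]
      rfl
    have hE : (flagsOf (d :: t)).isEmpty = false := by simp [flagsOf]
    simp only [has_reply]
    rw [if_neg (by simp), hglast]
    by_cases hrob : (pvSpk ((d :: t).getLast hne) == "robot") = true
    · rw [if_pos hrob]
      unfold aForm
      rw [if_neg (by simp [hE]), hlastD, hrob]
      rfl
    · rw [if_neg hrob]
      unfold aForm
      rw [if_neg (by simp [hE]), hlastD]
      rw [show (!(pvSpk ((d :: t).getLast hne) == "robot")) = true by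
        revert hrob; cases (pvSpk ((d :: t).getLast hne) == "robot") <;> simp]
      rw [if_pos rfl]
      rw [show (fun (s : Bool × Int) (i : Int) =>
          ((!(pvSpk (PySem.List.pyGetD (d :: t) (((d :: t).length : Int) - 1 - i) []) == "robot")),
            if !s.1 && !(pvSpk (PySem.List.pyGetD (d :: t) (((d :: t).length : Int) - 1 - i) []) == "robot")
            then s.2 + 1 else s.2)) =
          (fun (s : Bool × Int) i =>
            stepFn s (PySem.List.pyGetD (d :: t) (((d :: t).length : Int) - 1 - i) [])) from rfl]
      rw [foldl_range_rev]
      have hcr := foldl_step_eq ((d :: t).reverse) false 0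
      rw [hcr]
      unfold flagsOf
      rw [← List.map_reverse]
      norm_num

theorem filterMap_enumerate_eq_posFrom (details : List (List (String × String))) (s : Int) :
    (PySem.List.enumerate details s).filterMap
      (fun p => if !(pvSpk p.2 == "robot") then some p.1 else none)
      = posFrom s (flagsOf details) := by
  induction details generalizing s with
  | nil => simp [PySem.List.enumerate, flagsOf, posFrom]
  | cons d t ih =>
    rw [PySem.List.enumerate_cons, List.filterMap_cons]
    cases hd : (pvSpk d == "robot") with
    | true =>
      unfold flagsOf
      rw [List.map_cons, hd]
      rw [show posFrom s ((!true) :: t.map (fun d => !(pvSpk d == "robot"))) =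
          posFrom (s + 1) (t.map (fun d => !(pvSpk d == "robot"))) from rfl]
      simpa using ih (s + 1)
    | false =>
      unfold flagsOf
      rw [List.map_cons, hd]
      rw [show posFrom s ((!false) :: t.map (fun d => !(pvSpk d == "robot"))) =
          s :: posFrom (s + 1) (t.map (fun d => !(pvSpk d == "robot"))) from rfl]
      simpa using ih (s + 1)

theorem B_eq (details : List (List (String × String))) :
    has_reply_alt details = bForm (flagsOf details) := by
  simp only [has_reply_alt, bForm]
  rw [filterMap_enumerate_eq_posFrom]
  rw [show ((flagsOf details).length : Int) = (details.length : Int) by simp [flagsOf]]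

-- ===== VERDICT (by name: the statement is the Claim_ definition above) =====
theorem has_reply_spec : Claim_equal_has_reply := by
  intro details _ _
  unfold Spec_has_reply
  rw [A_eq, B_eq, crux]
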